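-- pv_equiv track=rewrite | github.com/Git-Vasanth/DocuMentor-Ai | src/backend/conqa_google.py | validate_llm_output
-- ===== SOURCE A (Python) =====
-- def validate_llm_output(llm_output, search_results):
--     if not search_results or 'items' not in search_results:
--         return False
--
--     llm_words = llm_output.lower().split()
--     for item in search_results['items']:
--         snippet = item.get('snippet', '').lower()
--         title = item.get('title', '').lower()
--         if any(word in snippet or word in title for word in llm_words):
--             return True
--     return False
-- ===== SOURCE B (Python) =====
-- def validate_llm_output(llm_output, search_results):
--     if not search_results:
--         return False
--     items = search_results.get('items')
--     if items is None:
--         return False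
--     corpus = ''
--     for item in items:
--         corpus += ' ' + item.get('snippet', '').lower() + ' ' + item.get('title', '').lower()
--     for word in llm_output.lower().split():
--         if word in corpus:
--             return True
--     return False
-- ===== Notes on version B (the rewrite author's own statement) =====
-- stated objective: alternative
-- what changed: B stages the work: it first accumulates one space-separated lowercase corpus of all snippets and titles, then scans that single corpus word by word with early return, instead of A's nested per-item/per-word substring test; the space separators make it exact because split() tokens contain no whitespace and cannot match across a seam.
import Mathlib
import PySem

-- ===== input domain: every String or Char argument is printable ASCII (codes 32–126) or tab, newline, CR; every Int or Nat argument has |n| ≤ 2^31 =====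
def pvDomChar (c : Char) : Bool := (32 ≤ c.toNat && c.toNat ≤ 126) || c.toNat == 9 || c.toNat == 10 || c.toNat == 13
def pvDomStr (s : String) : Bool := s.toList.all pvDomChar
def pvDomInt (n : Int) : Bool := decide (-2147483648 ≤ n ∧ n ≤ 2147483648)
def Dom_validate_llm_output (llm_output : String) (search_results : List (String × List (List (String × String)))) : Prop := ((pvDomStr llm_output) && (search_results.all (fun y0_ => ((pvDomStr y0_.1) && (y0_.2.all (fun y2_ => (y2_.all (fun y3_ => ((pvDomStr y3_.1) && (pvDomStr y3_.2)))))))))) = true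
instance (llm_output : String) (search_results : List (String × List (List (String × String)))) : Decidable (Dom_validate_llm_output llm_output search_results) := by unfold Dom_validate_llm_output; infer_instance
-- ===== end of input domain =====

-- B stages the work: it first accumulates one space-separated lowercase corpus of all
-- snippets and titles, then scans that single corpus word by word with early return,
-- instead of A's nested per-item/per-word substring test (alternative decomposition).

-- ===== PORT A =====
def validate_llm_output (llm_output : String) (search_results : List (String × List (List (String × String)))) : Bool :=
  if search_results.isEmpty || !(PySem.Dict.contains (PySem.Dict.mk search_results) "items") then false
  else
    -- llm_words = llm_output.lower().split(); loop over items with early return = List.any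
    (PySem.Dict.getD (PySem.Dict.mk search_results) "items" []).any (fun item =>
      (PySem.Str.split₀ (PySem.Str.lower llm_output)).any (fun word =>
        PySem.Str.isIn word (PySem.Str.lower (PySem.Dict.getD (PySem.Dict.mk item) "snippet" "")) ||
        PySem.Str.isIn word (PySem.Str.lower (PySem.Dict.getD (PySem.Dict.mk item) "title" ""))))

-- ===== PORT B =====
-- B's second loop: 'for word in words: if word in corpus: return True / return False'
def wordHit : List String → List Char → Bool
  | [], _ => false
  | w :: ws, corpus => if PySem.Chars.isIn w.toList corpus then true else wordHit ws corpus

def validate_llm_output_alt (llm_output : String) (search_results : List (String × List (List (String × String)))) : Bool :=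
  if search_results.isEmpty then false
  else
    match PySem.Dict.get? (PySem.Dict.mk search_results) "items" with
    | none => false
    | some items =>
      -- corpus accumulated left to right: corpus += ' ' + snippet.lower() + ' ' + title.lower()
      let corpus : List Char := items.foldl (fun acc item =>
        acc ++ ' ' :: PySem.Chars.lower (PySem.Dict.getD (PySem.Dict.mk item) "snippet" "").toList
            ++ ' ' :: PySem.Chars.lower (PySem.Dict.getD (PySem.Dict.mk item) "title" "").toList) []
      wordHit (PySem.Str.split₀ (PySem.Str.lower llm_output)) corpus

-- ===== PRECONDITION & SPEC =====
def Spec_validate_llm_output (llm_output : String) (search_results : List (String × List (List (String × String)))) (out : Bool) : Prop := out = validate_llm_output_alt llm_output search_results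
instance (llm_output : String) (search_results : List (String × List (List (String × String)))) (out : Bool) : Decidable (Spec_validate_llm_output llm_output search_results out) := by unfold Spec_validate_llm_output; infer_instance

-- ===== CLAIM (what is proved, stated in full; the proofs are below) =====
def Claim_equal_validate_llm_output : Prop := ∀ (llm_output : String) (search_results : List (String × List (List (String × String)))), Dom_validate_llm_output llm_output search_results → Spec_validate_llm_output llm_output search_results (validate_llm_output llm_output search_results)

-- ===== LEMMAS AND PROOFS =====

-- every token produced by Python's str.split() is nonempty and whitespace-free
theorem split0_go_mem (s : List Char) (cur : List Char) (acc : List (List Char))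
    (hcur : ∀ c ∈ cur, PySem.Chars.isspace c = false)
    (hacc : ∀ w ∈ acc, w ≠ [] ∧ ∀ c ∈ w, PySem.Chars.isspace c = false) :
    ∀ w ∈ PySem.Chars.split₀.go s cur acc, w ≠ [] ∧ ∀ c ∈ w, PySem.Chars.isspace c = false := by
  induction s generalizing cur acc with
  | nil =>
    intro w hw
    rw [PySem.Chars.split₀.go] at hw
    by_cases hce : cur.isEmpty
    · simp only [hce, if_true, List.mem_reverse] at hw
      exact hacc w hw
    · simp only [hce, if_false, Bool.false_eq_true, List.mem_reverse, List.mem_cons] at hw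
      rcases hw with h | h
      · subst h
        refine ⟨by simpa using (List.isEmpty_eq_false_iff.mp (by simpa using hce)), ?_⟩
        intro c hc; exact hcur c (by simpa using hc)
      · exact hacc w h
  | cons c rest ih =>
    intro w hw
    rw [PySem.Chars.split₀.go] at hw
    by_cases hsp : PySem.Chars.isspace c = true
    · by_cases hce : cur.isEmpty
      · simp only [hsp, hce, if_true] at hw
        exact ih [] acc (by simp) hacc w hw
      · simp only [hsp, hce, if_true, if_false, Bool.false_eq_true] at hw
        refine ih [] (cur.reverse :: acc) (by simp) ?_ w hw
        intro v hv
        rcases List.mem_cons.mp hv with h | h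
        · subst h
          refine ⟨by simpa using (List.isEmpty_eq_false_iff.mp (by simpa using hce)), ?_⟩
          intro d hd; exact hcur d (by simpa using hd)
        · exact hacc v h
    · simp only [hsp, if_false, Bool.false_eq_true] at hw
      refine ih (c :: cur) acc ?_ hacc w hw
      intro d hd
      rcases List.mem_cons.mp hd with h | h
      · subst h; simpa using hsp
      · exact hcur d h

theorem mem_split0_spec (s w : List Char) (hw : w ∈ PySem.Chars.split₀ s) :
    w ≠ [] ∧ ∀ c ∈ w, PySem.Chars.isspace c = false :=
  split0_go_mem s [] [] (by simp) (by simp) w hw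

-- a word not containing c cannot straddle the seam: infix of a ++ c :: b ↔ infix of a or of b
theorem infix_append_cons_iff {α : Type} {w a b : List α} {c : α} (hc : c ∉ w) :
    w <:+: (a ++ c :: b) ↔ w <:+: a ∨ w <:+: b := by
  constructor
  · rintro ⟨l, r, h⟩
    by_cases h1 : l.length + w.length ≤ a.length
    · left
      have hpre1 : l ++ w <+: a ++ c :: b := ⟨r, by simpa using h⟩
      have hpre2 : a <+: a ++ c :: b := ⟨c :: b, rfl⟩
      have hp : l ++ w <+: a :=
        List.prefix_of_prefix_length_le hpre1 hpre2 (by simpa using h1)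
      rcases hp with ⟨t, ht⟩
      exact ⟨l, t, ht⟩
    · by_cases h2 : a.length + 1 ≤ l.length
      · right
        have hpre1 : a ++ [c] <+: a ++ c :: b := ⟨b, by simp⟩
        have hpre2 : l <+: a ++ c :: b := ⟨w ++ r, by simpa [List.append_assoc] using h⟩
        have hp : a ++ [c] <+: l :=
          List.prefix_of_prefix_length_le hpre1 hpre2 (by simpa using h2)
        rcases hp with ⟨t, ht⟩
        rw [← ht] at h
        have hb : t ++ (w ++ r) = b := by
          have h' : a ++ (c :: (t ++ (w ++ r))) = a ++ (c :: b) := by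
            simpa [List.append_assoc] using h
          have := List.append_cancel_left h'
          simpa using this
        exact ⟨t, r, by rw [← hb]; simp [List.append_assoc]⟩
      · exfalso
        have hl : l.length ≤ a.length := by omega
        have hlt : a.length - l.length < w.length := by omega
        have h' : l ++ (w ++ r) = a ++ c :: b := by simpa [List.append_assoc] using h
        have hidx : w[a.length - l.length]? = some c := by
          have e1 : (l ++ (w ++ r))[a.length]? = (w ++ r)[a.length - l.length]? :=
            List.getElem?_append_right hl
          have e2 : (w ++ r)[a.length - l.length]? = w[a.length - l.length]? :=
            List.getElem?_append_left hlt
          have e3 : (a ++ c :: b)[a.length]? = some c := by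
            rw [List.getElem?_append_right (le_refl _)]
            simp
          rw [← e2, ← e1, h', e3]
        exact hc (List.mem_of_getElem? hidx)
  · rintro (h | h)
    · rcases h with ⟨l, r, hh⟩
      exact ⟨l, r ++ c :: b, by rw [← hh]; simp [List.append_assoc]⟩
    · rcases h with ⟨l, r, hh⟩
      exact ⟨a ++ c :: l, r, by rw [← hh]; simp [List.append_assoc]⟩

-- B's early-return word loop is List.any
theorem wordHit_eq_any (ws : List String) (corpus : List Char) :
    wordHit ws corpus = ws.any (fun w => PySem.Chars.isIn w.toList corpus) := by
  induction ws with
  | nil => rfl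
  | cons w ws ih =>
    rw [wordHit]
    by_cases h : PySem.Chars.isIn w.toList corpus = true <;> simp [h, ih]

-- a space-free nonempty word is an infix of the accumulated corpus iff it is an infix
-- of the accumulator or of one of the appended fields
theorem corpus_infix_iff {α : Type} {w : List Char} (hs : (' ' : Char) ∉ w)
    (f g : α → List Char) :
    ∀ (items : List α) (acc : List Char),
      (w <:+: items.foldl (fun acc it => acc ++ ' ' :: f it ++ ' ' :: g it) acc)
      ↔ (w <:+: acc ∨ ∃ it ∈ items, w <:+: f it ∨ w <:+: g it) := by
  intro items
  induction items with
  | nil => intro acc; simp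
  | cons it rest ih =>
    intro acc
    rw [List.foldl_cons, ih]
    have hsplit : acc ++ ' ' :: f it ++ ' ' :: g it = acc ++ ' ' :: (f it ++ ' ' :: g it) := by
      simp [List.append_assoc]
    rw [hsplit, infix_append_cons_iff hs, infix_append_cons_iff hs]
    constructor
    · rintro ((h | h | h) | ⟨x, hx, hxw⟩)
      · exact Or.inl h
      · exact Or.inr ⟨it, by simp, Or.inl h⟩
      · exact Or.inr ⟨it, by simp, Or.inr h⟩
      · exact Or.inr ⟨x, by simp [hx], hxw⟩
    · rintro (h | ⟨x, hx, hxw⟩)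
      · exact Or.inl (Or.inl h)
      · rcases List.mem_cons.mp hx with h | h
        · subst h
          rcases hxw with h | h
          · exact Or.inl (Or.inr (Or.inl h))
          · exact Or.inl (Or.inr (Or.inr h))
        · exact Or.inr ⟨x, h, hxw⟩

-- ===== VERDICT (by name: the statement is the Claim_ definition above) =====
theorem validate_llm_output_spec : Claim_equal_validate_llm_output := by
  intro llm_output search_results _
  unfold Spec_validate_llm_output validate_llm_output validate_llm_output_alt
  by_cases hemp : search_results.isEmpty
  · simp [hemp]
  · simp only [hemp, if_false, Bool.false_or, Bool.false_eq_true]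
    cases hget : PySem.Dict.get? (PySem.Dict.mk search_results) "items" with
    | none =>
      have hcon : PySem.Dict.contains (PySem.Dict.mk search_results) "items" = false := by
        rw [PySem.Dict.contains_eq_isSome_get?, hget]; rfl
      simp [hcon]
    | some items =>
      have hcon : PySem.Dict.contains (PySem.Dict.mk search_results) "items" = true := by
        rw [PySem.Dict.contains_eq_isSome_get?, hget]; rfl
      have hgetD : PySem.Dict.getD (PySem.Dict.mk search_results) "items" [] = items := by
        rw [PySem.Dict.getD_eq_get?_getD, hget]; rfl
      simp only [hcon, Bool.not_true, if_false, Bool.false_eq_true, hgetD]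
      generalize hW : PySem.Str.split₀ (PySem.Str.lower llm_output) = words
      have hwordspec : ∀ w ∈ words, w.toList ≠ [] ∧ (' ' : Char) ∉ w.toList := by
        intro w hw
        have hmem : w.toList ∈ PySem.Chars.split₀ (PySem.Str.lower llm_output).toList := by
          rw [← PySem.Str.split₀_map_toList, hW]
          exact List.mem_map_of_mem hw
        obtain ⟨hne, hns⟩ := mem_split0_spec _ _ hmem
        refine ⟨hne, fun hmem' => ?_⟩
        have := hns ' ' hmem'
        simp [PySem.Chars.isspace] at this
      rw [wordHit_eq_any]
      have key : (items.any (fun item =>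
            words.any (fun word =>
              PySem.Str.isIn word (PySem.Str.lower (PySem.Dict.getD (PySem.Dict.mk item) "snippet" "")) ||
              PySem.Str.isIn word (PySem.Str.lower (PySem.Dict.getD (PySem.Dict.mk item) "title" "")))) = true)
          ↔ (words.any (fun w => PySem.Chars.isIn w.toList
              (items.foldl (fun acc item =>
                acc ++ ' ' :: PySem.Chars.lower (PySem.Dict.getD (PySem.Dict.mk item) "snippet" "").toList
                    ++ ' ' :: PySem.Chars.lower (PySem.Dict.getD (PySem.Dict.mk item) "title" "").toList) [])) = true) := by
        simp only [List.any_eq_true, Bool.or_eq_true, PySem.Str.isIn_iff_infix,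
          PySem.Str.toList_lower, PySem.Chars.isIn_iff_infix]
        constructor
        · rintro ⟨item, hitem, w, hw, hin⟩
          obtain ⟨hne, hsp⟩ := hwordspec w hw
          refine ⟨w, hw, ?_⟩
          rw [corpus_infix_iff hsp]
          exact Or.inr ⟨item, hitem, hin⟩
        · rintro ⟨w, hw, hin⟩
          obtain ⟨hne, hsp⟩ := hwordspec w hw
          rw [corpus_infix_iff hsp] at hin
          rcases hin with h | ⟨item, hitem, hin⟩
          · exact absurd (List.eq_nil_of_infix_nil h) hne
          · exact ⟨item, hitem, w, hw, hin⟩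
      cases hA : items.any (fun item =>
          words.any (fun word =>
            PySem.Str.isIn word (PySem.Str.lower (PySem.Dict.getD (PySem.Dict.mk item) "snippet" "")) ||
            PySem.Str.isIn word (PySem.Str.lower (PySem.Dict.getD (PySem.Dict.mk item) "title" "")))) with
      | false =>
        rw [hA] at key
        symm
        rw [← Bool.not_eq_true]
        intro hB
        exact absurd (key.mpr hB) (by simp)
      | true => exact (key.mp hA).symm
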